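-- pv_equiv track=rewrite | github.com/jbkim0526/Problem_Solving | 프로그래머스/Level2/68. 기능개발/sol2.py | solution
-- ===== SOURCE A (Python) =====
-- from math import ceil
-- from collections import Counter
--
-- def solution(progresses, speeds):
--     answer = []
--     n = len(progresses)
--     l = [ceil((100-progresses[0])/speeds[0])]
--     for i in range(1,n):
--         l.append(max(l[i-1],ceil((100-progresses[i])/speeds[i])))
--
--     counts = Counter(l)
--     for key, value in counts.items():
--         answer.append(value)
--     return answer
-- ===== SOURCE B (Python) =====
-- def solution(progresses, speeds):
--     days = []
--     for i in range(len(progresses)):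
--         days.append(-(-(100 - progresses[i]) // speeds[i]))
--     answer = []
--     front = days[0]
--     count = 1
--     for d in days[1:]:
--         if d <= front:
--             count += 1
--         else:
--             answer.append(count)
--             front = d
--             count = 1
--     answer.append(count)
--     return answer
-- ===== Notes on version B (the rewrite author's own statement) =====
-- stated objective: simpler
-- what changed: B replaces A's running-max list plus Counter/dict pass by one direct grouping pass (front/count accumulator) over the per-feature completion days, and computes the ceiling with exact integer division -(-x//s) instead of float division plus math.ceil.
import Mathlib
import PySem

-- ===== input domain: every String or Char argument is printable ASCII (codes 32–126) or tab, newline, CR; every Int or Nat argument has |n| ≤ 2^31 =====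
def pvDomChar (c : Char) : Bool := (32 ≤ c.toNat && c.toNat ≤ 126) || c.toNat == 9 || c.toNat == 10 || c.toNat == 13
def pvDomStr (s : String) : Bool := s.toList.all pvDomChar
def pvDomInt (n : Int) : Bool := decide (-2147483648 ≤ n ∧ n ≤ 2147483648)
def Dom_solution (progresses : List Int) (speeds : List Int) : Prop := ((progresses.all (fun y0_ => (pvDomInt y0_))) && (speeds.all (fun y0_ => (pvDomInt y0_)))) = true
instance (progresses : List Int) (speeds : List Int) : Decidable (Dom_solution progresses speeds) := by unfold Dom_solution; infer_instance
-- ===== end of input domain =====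

-- B replaces A's running-max list + Counter pass by a single front/count grouping pass over the
-- completion days (objective: simpler); same O(n) cost, no speed claim. Return values only; neither
-- version mutates its arguments.

-- ===== PORT A =====
-- pvDay p s i = ceil((100 - p[i]) / s[i]) as the exact integer ceiling division -((-(100-p[i])) // s[i]).
-- On Dom (|ints| ≤ 2^31, so |100 - p[i]| < 2^53) with s[i] ≠ 0 (guaranteed by Pre_), Python's float
-- division is correctly rounded, so math.ceil of it equals this exact ceiling (A); B's Python computes
-- literally this integer expression.
def pvDay (progresses : List Int) (speeds : List Int) (i : Int) : Int :=
  -(PySem.Int.floordiv (-(100 - PySem.List.pyGetD progresses i 0)) (PySem.List.pyGetD speeds i 0))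

def solution (progresses : List Int) (speeds : List Int) : List Int :=
  let n : Int := progresses.length
  let l : List Int :=
    (PySem.List.pyRange 1 n 1).foldl
      (fun l i => l ++ [max (PySem.List.pyGetD l (i - 1) 0) (pvDay progresses speeds i)])
      [pvDay progresses speeds 0]
  let counts := PySem.Dict.counter l
  counts.items.foldl (fun answer kv => answer ++ [kv.2]) []

-- ===== PORT B =====
def solution_alt (progresses : List Int) (speeds : List Int) : List Int :=
  let days : List Int :=
    (PySem.List.pyRange 0 (progresses.length : Int) 1).map (pvDay progresses speeds)
  let front : Int := PySem.List.pyGetD days 0 0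
  let r :=
    (PySem.List.slice days (some 1) none).foldl
      (fun (st : List Int × Int × Int) d =>
        if d ≤ st.2.1 then (st.1, st.2.1, st.2.2 + 1)
        else (st.1 ++ [st.2.2], d, 1))
      ([], front, 1)
  r.1 ++ [r.2.2]

-- ===== PRECONDITION & SPEC =====
-- Pre_ excludes exactly the inputs where Python A raises: empty progresses (IndexError on
-- progresses[0]), speeds shorter than progresses (IndexError on speeds[i]), or a zero speed among
-- the first len(progresses) speeds (ZeroDivisionError). B raises on the same inputs.
def Pre_solution (progresses : List Int) (speeds : List Int) : Prop :=
  progresses ≠ [] ∧ progresses.length ≤ speeds.length ∧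
    ∀ x ∈ speeds.take progresses.length, x ≠ 0
instance (progresses : List Int) (speeds : List Int) : Decidable (Pre_solution progresses speeds) := by unfold Pre_solution; infer_instance

def pvWitness_solution : List Int × List Int := ([93, 30, 55], [1, 30, 5])

def Spec_solution (progresses : List Int) (speeds : List Int) (out : List Int) : Prop := out = solution_alt progresses speeds
instance (progresses : List Int) (speeds : List Int) (out : List Int) : Decidable (Spec_solution progresses speeds out) := by unfold Spec_solution; infer_instance

-- ===== CLAIM (what is proved, stated in full; the proofs are below) =====
def Claim_equal_solution : Prop := ∀ (progresses : List Int) (speeds : List Int), Dom_solution progresses speeds → Pre_solution progresses speeds → Spec_solution progresses speeds (solution progresses speeds)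

-- ===== LEMMAS AND PROOFS =====

-- pvDedup: first-occurrence dedup in filter form (shown equal to PySem.Set.ofList);
-- pvScan m ds: the running maxima of ds after current maximum m; pvGrp m c ds: B-style grouping.
def pvDedup : List Int → List Int
  | [] => []
  | x :: xs => x :: pvDedup (xs.filter (fun y => y != x))
termination_by xs => xs.length
decreasing_by simpa using Nat.lt_succ_of_le (List.length_filter_le _ _)

def pvScan (m : Int) : List Int → List Int
  | [] => []
  | d :: ds => (max m d) :: pvScan (max m d) ds

def pvGrp (m : Int) (c : Int) : List Int → List Int
  | [] => [c]
  | d :: ds => if d ≤ m then pvGrp m (c + 1) ds else c :: pvGrp d 1 ds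

theorem pvDedup_subset_aux : ∀ (n : Nat) (xs : List Int), xs.length ≤ n →
    ∀ (y : Int), y ∈ pvDedup xs → y ∈ xs := by
  intro n
  induction n with
  | zero =>
    intro xs hlen y hy
    rw [List.length_eq_zero_iff.mp (Nat.le_zero.mp hlen)] at hy ⊢
    simpa [pvDedup.eq_1] using hy
  | succ n ih =>
    intro xs hlen y hy
    match xs with
    | [] => simpa [pvDedup.eq_1] using hy
    | x :: xs =>
      rw [pvDedup.eq_2] at hy
      rcases List.mem_cons.mp hy with h | h
      · simp [h]
      · have hl : (xs.filter (fun y => y != x)).length ≤ n := by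
          have := List.length_filter_le (fun y => y != x) xs
          simp at hlen; omega
        exact List.mem_cons_of_mem _ (List.mem_of_mem_filter (ih _ hl y h))

theorem pvDedup_subset (xs : List Int) (y : Int) (h : y ∈ pvDedup xs) : y ∈ xs :=
  pvDedup_subset_aux xs.length xs le_rfl y h

theorem pvFoldl_add_eq (xs : List Int) : ∀ acc : List Int,
    xs.foldl PySem.Set.add acc = acc ++ pvDedup (xs.filter (fun x => !(acc.contains x))) := by
  induction xs with
  | nil => intro acc; simp [pvDedup.eq_1]
  | cons x xs ih =>
    intro acc
    simp only [List.foldl_cons, PySem.Set.add, PySem.Set.contains, List.filter_cons]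
    by_cases hc : acc.contains x
    · rw [if_pos hc, ih acc]
      have hx : x ∈ acc := by simpa [List.contains_eq_mem] using hc
      simp [hx]
    · rw [if_neg hc]
      rw [ih (acc ++ [x])]
      simp only [hc, Bool.not_false, if_pos]
      rw [pvDedup.eq_2, List.filter_filter]
      have hfil : List.filter (fun z => !((acc ++ [x]).contains z)) xs
          = List.filter (fun a => a != x && !acc.contains a) xs := by
        apply List.filter_congr
        intro z _
        simp only [List.contains_eq_mem, List.mem_append, List.mem_singleton]
        by_cases hz : z = x <;> by_cases hz2 : z ∈ acc <;> simp [hz, hz2]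
      rw [hfil, List.append_assoc, List.singleton_append]

theorem pvOfList_eq_pvDedup (xs : List Int) : PySem.Set.ofList xs = pvDedup xs := by
  rw [PySem.Set.ofList, PySem.Set.empty, pvFoldl_add_eq]
  simp

theorem pvScan_ge (ds : List Int) : ∀ (m : Int), ∀ x ∈ pvScan m ds, m ≤ x := by
  induction ds with
  | nil => intro m x hx; simp [pvScan] at hx
  | cons d ds ih =>
    intro m x hx
    rcases List.mem_cons.mp hx with h | h
    · exact h ▸ le_max_left m d
    · exact le_trans (le_max_left m d) (ih (max m d) x h)

theorem pvKey (ds : List Int) : ∀ (m c : Int),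
    (pvDedup (m :: pvScan m ds)).map
        (fun k => ((m :: pvScan m ds).count k : Int) + (if k = m then c - 1 else 0))
      = pvGrp m c ds := by
  induction ds with
  | nil =>
    intro m c
    simp [pvScan, pvGrp, pvDedup.eq_2, pvDedup.eq_1, List.count_cons]
  | cons d ds ih =>
    intro m c
    by_cases h : d ≤ m
    · have hmax : max m d = m := max_eq_left h
      simp only [pvScan, hmax, pvGrp, if_pos h]
      have hded : pvDedup (m :: m :: pvScan m ds) = pvDedup (m :: pvScan m ds) := by
        rw [pvDedup.eq_2, pvDedup.eq_2, List.filter_cons]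
        simp
      rw [hded]
      rw [← ih m (c + 1)]
      apply List.map_congr_left
      intro k hk
      by_cases hkm : k = m <;> simp [List.count_cons, hkm] <;> push_cast <;> omega
    · have hmax : max m d = d := max_eq_right (le_of_not_ge h)
      simp only [pvScan, hmax, pvGrp, if_neg h]
      have hgt : ∀ x ∈ d :: pvScan d ds, m < x := by
        intro x hx
        rcases List.mem_cons.mp hx with h1 | h1
        · omega
        · have := pvScan_ge ds d x h1; omega
      have hded : pvDedup (m :: d :: pvScan d ds) = m :: pvDedup (d :: pvScan d ds) := by
        rw [pvDedup.eq_2]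
        congr 1
        rw [List.filter_eq_self.mpr]
        intro x hx
        have := hgt x hx
        simp; omega
      rw [hded, List.map_cons]
      have hnot : m ∉ d :: pvScan d ds := by
        intro hmem; exact absurd (hgt m hmem) (lt_irrefl m)
      congr 1
      · simp [List.count_cons, List.count_eq_zero.mpr hnot]
      · rw [← ih d 1]
        apply List.map_congr_left
        intro k hk
        have hkmem : k ∈ d :: pvScan d ds := pvDedup_subset _ _ hk
        have hkm : k ≠ m := by intro e; exact absurd (hgt k (e ▸ hkmem)) (by omega)
        have hmd : ¬ (m = d) := by omega
        have hdm : ¬ (d = m) := by omega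
        by_cases hkd : k = d <;> simp [List.count_cons, hkm, hkd, hmd, hdm, Ne.symm hkm]

theorem pvGetD_last (acc : List Int) (h : acc ≠ []) :
    acc.getD (acc.length - 1) 0 = acc.getLast h := by
  have hlen : acc.length - 1 < acc.length := by
    have := List.length_pos_iff.mpr h; omega
  rw [List.getD_eq_getElem _ _ hlen, List.getLast_eq_getElem]

theorem pvFoldB (ds : List Int) : ∀ (ans : List Int) (m c : Int),
    (ds.foldl
        (fun (st : List Int × Int × Int) d =>
          if d ≤ st.2.1 then (st.1, st.2.1, st.2.2 + 1)
          else (st.1 ++ [st.2.2], d, 1)) (ans, m, c)).1 ++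
      [(ds.foldl
        (fun (st : List Int × Int × Int) d =>
          if d ≤ st.2.1 then (st.1, st.2.1, st.2.2 + 1)
          else (st.1 ++ [st.2.2], d, 1)) (ans, m, c)).2.2] = ans ++ pvGrp m c ds := by
  induction ds with
  | nil => intro ans m c; simp [pvGrp]
  | cons d ds ih =>
    intro ans m c
    simp only [List.foldl_cons]
    by_cases h : d ≤ m
    · simp only [if_pos h, pvGrp, ih]
    · simp only [if_neg h, pvGrp, ih, List.append_assoc, List.singleton_append]

theorem pvFoldA (f : Int → Int) : ∀ (k : Nat) (acc : List Int) (h : acc ≠ []),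
    (PySem.List.pyRange (acc.length : Int) ((acc.length : Int) + (k : Int)) 1).foldl
        (fun l i => l ++ [max (PySem.List.pyGetD l (i - 1) 0) (f i)]) acc
      = acc ++ pvScan (acc.getLast h)
          ((PySem.List.pyRange (acc.length : Int) ((acc.length : Int) + (k : Int)) 1).map f) := by
  intro k
  induction k with
  | zero =>
    intro acc h
    rw [PySem.List.pyRange_one_eq_nil (by omega)]
    simp [pvScan]
  | succ k ih =>
    intro acc h
    have hlt : (acc.length : Int) < (acc.length : Int) + ((k : Nat) + 1 : Nat) := by push_cast; omega
    rw [PySem.List.pyRange_one_cons hlt]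
    simp only [List.foldl_cons, List.map_cons]
    have hlp : 0 < acc.length := List.length_pos_iff.mpr h
    have hidx : (acc.length : Int) - 1 = ((acc.length - 1 : Nat) : Int) := by push_cast [hlp]; omega
    have hget : PySem.List.pyGetD acc ((acc.length : Int) - 1) 0 = acc.getLast h := by
      rw [hidx, PySem.List.pyGetD_natCast, pvGetD_last]
    rw [hget]
    set m1 := max (acc.getLast h) (f (acc.length : Int)) with hm1
    have hne' : acc ++ [m1] ≠ [] := by simp
    have hlen' : ((acc ++ [m1]).length : Int) = (acc.length : Int) + 1 := by simp
    have hrange : PySem.List.pyRange ((acc.length : Int) + 1) ((acc.length : Int) + ((k : Nat) + 1 : Nat)) 1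
        = PySem.List.pyRange (((acc ++ [m1]).length : Int)) ((((acc ++ [m1]).length : Int)) + (k : Int)) 1 := by
      rw [hlen']; congr 1; push_cast; ring
    rw [hrange, ih (acc ++ [m1]) hne']
    have hlast : (acc ++ [m1]).getLast hne' = m1 := by simp
    rw [hlast, List.append_assoc, List.singleton_append]
    simp only [pvScan]
    rw [hm1]

theorem pvKey1 (ds : List Int) (m : Int) :
    (pvDedup (m :: pvScan m ds)).map (fun k => ((m :: pvScan m ds).count k : Int))
      = pvGrp m 1 ds := by
  have h := pvKey ds m 1
  simpa using h

theorem pvMain (p s : List Int) (hne : p ≠ []) : solution p s = solution_alt p s := by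
  have hn : 1 ≤ p.length := List.length_pos_iff.mpr hne
  have f := pvDay p s
  have hr : PySem.List.pyRange 1 (p.length : Int) 1
      = PySem.List.pyRange (([pvDay p s 0] : List Int).length : Int)
          ((([pvDay p s 0] : List Int).length : Int) + ((p.length - 1 : Nat) : Int)) 1 := by
    congr 1
    simp only [List.length_cons, List.length_nil]
    omega
  have hfold := pvFoldA (pvDay p s) (p.length - 1) [pvDay p s 0] (by simp)
  rw [← hr] at hfold
  have hlast : ([pvDay p s 0] : List Int).getLast (by simp) = pvDay p s 0 := rfl
  rw [hlast] at hfold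
  have hl : (PySem.List.pyRange 1 (p.length : Int) 1).foldl
      (fun l i => l ++ [max (PySem.List.pyGetD l (i - 1) 0) (pvDay p s i)])
      [pvDay p s 0]
    = pvDay p s 0 :: pvScan (pvDay p s 0)
        ((PySem.List.pyRange 1 (p.length : Int) 1).map (pvDay p s)) := by
    rw [hfold]; rfl
  have hzero : PySem.List.pyRange 0 (p.length : Int) 1
      = 0 :: PySem.List.pyRange 1 (p.length : Int) 1 := by
    rw [PySem.List.pyRange_one_cons (by exact_mod_cast hn)]
    norm_num
  show (PySem.Dict.counter _).items.foldl (fun answer kv => answer ++ [kv.2]) [] = _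
  rw [hl]
  rw [PySem.List.foldl_append_singleton_eq_map (f := fun kv : Int × Int => kv.2)]
  rw [PySem.Dict.items_counter, List.map_map]
  rw [pvOfList_eq_pvDedup]
  have hA := pvKey1 ((PySem.List.pyRange 1 (p.length : Int) 1).map (pvDay p s)) (pvDay p s 0)
  rw [List.nil_append]
  rw [show ((fun kv : Int × Int => kv.2) ∘ fun k => (k, ((pvDay p s 0 :: pvScan (pvDay p s 0) ((PySem.List.pyRange 1 (p.length : Int) 1).map (pvDay p s))).count k : Int))) = (fun k => ((pvDay p s 0 :: pvScan (pvDay p s 0) ((PySem.List.pyRange 1 (p.length : Int) 1).map (pvDay p s))).count k : Int)) from rfl]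
  rw [hA]
  -- B side
  show _ = (let days : List Int := (PySem.List.pyRange 0 (p.length : Int) 1).map (pvDay p s);
    let front : Int := PySem.List.pyGetD days 0 0;
    let r := (PySem.List.slice days (some 1) none).foldl
      (fun (st : List Int × Int × Int) d =>
        if d ≤ st.2.1 then (st.1, st.2.1, st.2.2 + 1)
        else (st.1 ++ [st.2.2], d, 1)) ([], front, 1);
    r.1 ++ [r.2.2])
  simp only [hzero, List.map_cons]
  rw [PySem.List.slice_from_one]
  simp only [List.tail_cons, PySem.List.pyGetD_zero_cons]
  rw [pvFoldB]
  simp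

-- ===== VERDICT (by name: the statement is the Claim_ definition above) =====
theorem solution_spec : Claim_equal_solution := by
  intro p s _dom hpre
  unfold Spec_solution
  exact pvMain p s hpre.1
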